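-- pv_equiv track=rewrite | github.com/benplatten/thesis | dev/env.py | check_b2b
-- ===== SOURCE A (Python) =====
-- def check_b2b(worker_array):
--     countb2b=0
--     count=0
--     for i in range(len(worker_array)):
--         if worker_array[i]==1:
--             count=count+1
--             if count > 1:
--                 countb2b += 1
--         else:
--             count=0
--
--     return countb2b
-- ===== SOURCE B (Python) =====
-- def check_b2b(worker_array):
--     # Run-length decomposition: each maximal run of k consecutive 1s
--     # contains exactly k-1 back-to-back adjacencies.
--     total = 0
--     i = 0
--     n = len(worker_array)
--     while i < n:
--         if worker_array[i] == 1: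
--             j = i
--             while j < n and worker_array[j] == 1:
--                 j += 1
--             total += j - i - 1
--             i = j
--         else:
--             i += 1
--     return total
-- ===== Notes on version B (the rewrite author's own statement) =====
-- stated objective: alternative
-- what changed: Replaced the per-element pass with a run-length counter reset on non-1s by a run-length decomposition: an outer scan that, at each 1, runs an inner loop to skip the whole maximal run of 1s and adds (run length - 1) at once.
import Mathlib
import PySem

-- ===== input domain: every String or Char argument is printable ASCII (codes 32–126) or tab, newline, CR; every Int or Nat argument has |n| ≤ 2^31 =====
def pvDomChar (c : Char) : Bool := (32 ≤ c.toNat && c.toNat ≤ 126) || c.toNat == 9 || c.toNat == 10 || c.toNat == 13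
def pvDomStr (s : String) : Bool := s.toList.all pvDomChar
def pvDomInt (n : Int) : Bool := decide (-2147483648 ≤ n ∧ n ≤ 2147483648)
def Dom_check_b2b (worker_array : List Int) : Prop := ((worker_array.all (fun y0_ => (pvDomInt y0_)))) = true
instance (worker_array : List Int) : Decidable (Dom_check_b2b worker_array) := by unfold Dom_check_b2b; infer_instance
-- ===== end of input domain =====

-- B replaces A's per-element run counter (reset on non-1) by a run-length decomposition:
-- skip each maximal run of 1s at once and add (run length - 1); same O(n) cost, different structure.

-- ===== PORT A =====
-- literal port: for i in range(len(a)): if a[i]==1: count+=1; if count>1: countb2b+=1 else: count=0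
def check_b2b (worker_array : List Int) : Int :=
  (PySem.List.pyRange 0 (worker_array.length) 1).foldl
    (fun (s : Int × Int) i =>
      if PySem.List.pyGetD worker_array i 0 = 1 then
        if s.2 + 1 > 1 then (s.1 + 1, s.2 + 1) else (s.1, s.2 + 1)
      else (s.1, 0)) ((0 : Int), (0 : Int)) |>.1

-- ===== PORT B =====
-- port of Source B's index-based outer/inner while loops as recursion on the remaining suffix:
-- at a 1, the inner loop (takeWhile/dropWhile on ==1) skips the maximal run, adding run-1.
def check_b2b_alt (worker_array : List Int) : Int :=
  match worker_array with
  | [] => 0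
  | x :: t =>
    if x = 1 then
      (((((x :: t).takeWhile (fun y => y == 1)).length : Int)) - 1)
        + check_b2b_alt ((x :: t).dropWhile (fun y => y == 1))
    else check_b2b_alt t
termination_by worker_array.length
decreasing_by
  · have h := List.length_dropWhile_le (fun y => y == 1) t
    simp only [List.dropWhile_cons, show (x == 1) = true by simpa using ‹x = 1›, if_true,
      List.length_cons]
    exact Nat.lt_succ_of_le h
  · simp

-- ===== PRECONDITION & SPEC =====
def Spec_check_b2b (worker_array : List Int) (out : Int) : Prop := out = check_b2b_alt worker_array
instance (worker_array : List Int) (out : Int) : Decidable (Spec_check_b2b worker_array out) := by unfold Spec_check_b2b; infer_instance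

-- ===== CLAIM (what is proved, stated in full; the proofs are below) =====
def Claim_equal_check_b2b : Prop := ∀ (worker_array : List Int), Dom_check_b2b worker_array → Spec_check_b2b worker_array (check_b2b worker_array)

-- ===== LEMMAS AND PROOFS =====

-- common yardstick: count of adjacent (1,1) pairs, structural recursion
def pairCount : List Int → Int
  | a :: b :: t => (if a = 1 ∧ b = 1 then (1 : Int) else 0) + pairCount (b :: t)
  | _ => 0

-- head elements that agree on being 1 give the same pair count
theorem pairCount_cons_congr (a b : Int) (t : List Int) (h : a = 1 ↔ b = 1) :
    pairCount (a :: t) = pairCount (b :: t) := by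
  cases t with
  | nil => simp [pairCount]
  | cons x t' =>
    simp only [pairCount]
    congr 1
    by_cases hx : x = 1
    · simp [hx, h]
    · simp [hx]

-- a maximal run of 1s starting at the head contributes (run length - 1) pairs
theorem pairCount_run (t : List Int) :
    pairCount (1 :: t)
      = ((((1 :: t).takeWhile (fun y => y == 1)).length : Int) - 1)
        + pairCount ((1 :: t).dropWhile (fun y => y == 1)) := by
  induction t with
  | nil => simp [pairCount, List.takeWhile, List.dropWhile]
  | cons b t' ih =>
    by_cases hb : b = 1
    · subst hb
      simp only [pairCount, List.takeWhile_cons, List.dropWhile_cons] at *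
      norm_num at *
      omega
    · simp [pairCount, hb]

theorem alt_eq_pairCount (xs : List Int) : check_b2b_alt xs = pairCount xs := by
  induction xs using check_b2b_alt.induct with
  | case1 => simp [check_b2b_alt, pairCount]
  | case2 t ih =>
    rw [check_b2b_alt, if_pos rfl, ih]
    exact (pairCount_run t).symm
  | case3 x t hx ih =>
    rw [check_b2b_alt, if_neg hx, ih]
    cases t with
    | nil => simp [pairCount]
    | cons b t' => simp [pairCount, hx]

def stepA (s : Int × Int) (x : Int) : Int × Int :=
  if x = 1 then
    if s.2 + 1 > 1 then (s.1 + 1, s.2 + 1) else (s.1, s.2 + 1)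
  else (s.1, 0)

-- A's fold from state (c, k): the result's first component is c plus the pair count of
-- the list with a virtual previous element prepended (1 if a run of k ≥ 1 ones is open, else 0).
theorem foldA_fst (xs : List Int) : ∀ (c k : Int), 0 ≤ k →
    (xs.foldl stepA (c, k)).1 = c + pairCount ((if 0 < k then (1 : Int) else 0) :: xs) := by
  induction xs with
  | nil => intro c k _; simp [pairCount]
  | cons a t ih =>
    intro c k hk
    by_cases ha : a = 1
    · subst ha
      by_cases hk1 : 0 < k
      · have hs : stepA (c, k) 1 = (c + 1, k + 1) := by
          simp [stepA]; omega
        rw [List.foldl_cons, hs, ih (c + 1) (k + 1) (by omega),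
            if_pos (show (0:Int) < k + 1 by omega), if_pos hk1]
        simp only [pairCount]
        norm_num
        ring
      · have hk0 : k = 0 := by omega
        subst hk0
        have hs : stepA (c, (0:Int)) 1 = (c, 1) := by simp [stepA]
        rw [List.foldl_cons, hs, ih c 1 (by omega),
            if_pos (show (0:Int) < 1 by omega), if_neg (lt_irrefl (0:Int))]
        simp only [pairCount]
        norm_num
    · have hs : stepA (c, k) a = (c, 0) := by simp [stepA, ha]
      rw [List.foldl_cons, hs, ih c 0 le_rfl, if_neg (lt_irrefl (0:Int))]
      simp only [pairCount]
      rw [pairCount_cons_congr 0 a t (by simp [ha]),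
          if_neg (fun h => ha h.2)]
      ring

theorem check_b2b_eq_pairCount (xs : List Int) : check_b2b xs = pairCount xs := by
  unfold check_b2b
  rw [show (PySem.List.pyRange 0 (xs.length) 1).foldl
        (fun (s : Int × Int) i =>
          if PySem.List.pyGetD xs i 0 = 1 then
            if s.2 + 1 > 1 then (s.1 + 1, s.2 + 1) else (s.1, s.2 + 1)
          else (s.1, 0)) ((0 : Int), (0 : Int))
      = xs.foldl stepA ((0 : Int), (0 : Int)) from ?_]
  · rw [foldA_fst xs 0 0 le_rfl]
    simp only [lt_irrefl, if_false, zero_add]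
    cases xs with
    | nil => simp [pairCount]
    | cons a t =>
      simp only [pairCount]
      split_ifs with h
      · exact absurd h.1 one_ne_zero.symm
      · ring
  · have h := PySem.List.foldl_pyRange_pyGetD (xs := xs) (f := stepA) (d := (0 : Int))
      (init := ((0 : Int), (0 : Int))) (a := 0) le_rfl
    simpa [stepA] using h

-- ===== VERDICT (by name: the statement is the Claim_ definition above) =====
theorem check_b2b_spec : Claim_equal_check_b2b := by
  intro xs _
  unfold Spec_check_b2b
  rw [check_b2b_eq_pairCount, alt_eq_pairCount]
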